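-- pv_equiv track=rewrite | github.com/Helberthy/automato-finito | automato_finito.py | process
-- ===== SOURCE A (Python) =====
-- def process(automato, palavras):
--     alfabeto, estados, transicoes, estado_inicial, estados_finais = automato
--     resultados = {}
--
--     for palavra in palavras:
--         resultado = ''
--         estado_atual = estado_inicial
--
--         if any(simbolo not in alfabeto for simbolo in palavra):
--             resultados[palavra] = 'INVÁLIDA'
--             continue
--
--         for simbolo in palavra:
--             if (estado_atual, simbolo) in transicoes:
--                 estado_atual = transicoes[(estado_atual, simbolo)]
--             else:
--                 estado_atual = None
--                 break
--
--         if estado_atual in estados_finais: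
--             resultado = 'ACEITA'
--         else:
--             resultado = 'REJEITA'
--
--         resultados[palavra] = resultado
--
--     return resultados
-- ===== SOURCE B (Python) =====
-- def process(automato, palavras):
--     alfabeto, estados, transicoes, estado_inicial, estados_finais = automato
--
--     # Complete the automaton: two absorbing sink states (non-string sentinels,
--     # so they can never collide with real states or appear in estados_finais).
--     INV = ('INV',)    # sink for words containing a symbol outside the alphabet; dominant
--     DEAD = ('DEAD',)  # sink for a missing transition on a valid symbol
--
--     def step(q, s):
--         if s not in alfabeto:
--             return INV
--         if q is INV or q is DEAD:
--             return q
--         return transicoes.get((q, s), DEAD)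
--
--     def label(q):
--         if q is INV:
--             return 'INVÁLIDA'
--         return 'ACEITA' if q in estados_finais else 'REJEITA'
--
--     def classify(palavra):
--         q = estado_inicial
--         for s in palavra:
--             q = step(q, s)
--         return label(q)
--
--     return {palavra: classify(palavra) for palavra in palavras}
-- ===== Notes on version B (the rewrite author's own statement) =====
-- stated objective: alternative
-- what changed: B completes the automaton with two absorbing non-string sink states (a dominant invalid sink and a dead sink), runs every word through the single totalized step function with no validity pre-scan, no flag and no break, and reads the label off the final extended state; A does a separate any()-validity pass followed by a break-out transition loop.
import Mathlib
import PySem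

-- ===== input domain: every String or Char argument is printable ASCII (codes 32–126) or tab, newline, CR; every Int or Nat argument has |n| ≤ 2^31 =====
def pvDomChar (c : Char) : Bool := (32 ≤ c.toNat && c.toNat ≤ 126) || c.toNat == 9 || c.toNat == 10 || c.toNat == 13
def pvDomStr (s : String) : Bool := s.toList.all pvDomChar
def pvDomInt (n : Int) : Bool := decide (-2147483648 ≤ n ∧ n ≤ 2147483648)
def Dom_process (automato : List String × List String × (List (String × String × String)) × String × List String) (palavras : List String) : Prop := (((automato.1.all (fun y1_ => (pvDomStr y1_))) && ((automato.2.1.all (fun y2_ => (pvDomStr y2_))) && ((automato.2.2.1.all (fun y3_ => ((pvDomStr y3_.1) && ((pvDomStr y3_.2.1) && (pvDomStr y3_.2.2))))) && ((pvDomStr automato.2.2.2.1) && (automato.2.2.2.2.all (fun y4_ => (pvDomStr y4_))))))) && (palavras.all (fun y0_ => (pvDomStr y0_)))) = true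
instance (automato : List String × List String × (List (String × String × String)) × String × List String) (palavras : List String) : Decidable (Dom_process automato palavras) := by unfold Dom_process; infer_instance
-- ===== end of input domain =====

-- B completes the automaton with two absorbing sink states (invalid sink dominant) and runs each
-- word through the single totalized step — no validity pre-scan, no flag, no break; A's validity
-- pass + break-out transition loop is proved to return the same dict.

-- ===== PORT A =====
-- dict lookup `transicoes[(st, sym)]` / `(st, sym) in transicoes` on the association list (first match)
def pvTrans? (ts : List (String × String × String)) (st sym : String) : Option String :=
  match ts with
  | [] => none
  | (a, b, c) :: rest => if a = st ∧ b = sym then some c else pvTrans? rest st sym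

-- A's inner `for simbolo in palavra` loop with its break (none = Python's estado_atual = None)
def pvRunA (ts : List (String × String × String)) (st : String) : List Char → Option String
  | [] => some st
  | c :: cs =>
    match pvTrans? ts st (String.ofList [c]) with
    | some t => pvRunA ts t cs
    | none => none

def process (automato : List String × List String × (List (String × String × String)) × String × List String) (palavras : List String) : List (String × String) :=
  -- automato = (alfabeto, estados, transicoes, estado_inicial, estados_finais); projections written inline
  (palavras.foldl (fun (res : PySem.Dict String String) palavra =>
      if palavra.toList.any (fun c => !(automato.1.contains (String.ofList [c]))) then
        res.insert palavra "INVÁLIDA"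
      else
        let fin := pvRunA automato.2.2.1 automato.2.2.2.1 palavra.toList
        let r := if (match fin with | some s => automato.2.2.2.2.contains s | none => false) then "ACEITA" else "REJEITA"
        res.insert palavra r)
    PySem.Dict.empty).items

-- ===== PORT B =====
-- B's extended state space: the original (string) states plus the two sink states
inductive PvExtSt where
  | inv : PvExtSt
  | dead : PvExtSt
  | live : String → PvExtSt
deriving DecidableEq, Repr

-- B's totalized `step`
def pvStep (alfabeto : List String) (ts : List (String × String × String))
    (q : PvExtSt) (s : String) : PvExtSt :=
  if !(alfabeto.contains s) then .inv
  else match q with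
    | .inv => .inv
    | .dead => .dead
    | .live st =>
      match pvTrans? ts st s with
      | some t => .live t
      | none => .dead

-- B's `label`; the DEAD sentinel is a non-string so `q in estados_finais` is False there in Python
def pvLabel (finais : List String) : PvExtSt → String
  | .inv => "INVÁLIDA"
  | .dead => "REJEITA"
  | .live st => if finais.contains st then "ACEITA" else "REJEITA"

def process_alt (automato : List String × List String × (List (String × String × String)) × String × List String) (palavras : List String) : List (String × String) :=
  -- automato = (alfabeto, estados, transicoes, estado_inicial, estados_finais); projections written inline
  (palavras.foldl (fun (res : PySem.Dict String String) palavra =>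
      res.insert palavra
        (pvLabel automato.2.2.2.2
          (palavra.toList.foldl
            (fun q c => pvStep automato.1 automato.2.2.1 q (String.ofList [c]))
            (.live automato.2.2.2.1))))
    PySem.Dict.empty).items

-- ===== PRECONDITION & SPEC =====
def Spec_process (automato : List String × List String × (List (String × String × String)) × String × List String) (palavras : List String) (out : List (String × String)) : Prop := out = process_alt automato palavras
instance (automato : List String × List String × (List (String × String × String)) × String × List String) (palavras : List String) (out : List (String × String)) : Decidable (Spec_process automato palavras out) := by unfold Spec_process; infer_instance

-- ===== CLAIM (what is proved, stated in full; the proofs are below) =====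
def Claim_equal_process : Prop := ∀ (automato : List String × List String × (List (String × String × String)) × String × List String) (palavras : List String), Dom_process automato palavras → Spec_process automato palavras (process automato palavras)

-- ===== LEMMAS AND PROOFS =====

-- the invalid sink is absorbing
theorem pvFoldInv (alfabeto : List String) (ts : List (String × String × String)) (cs : List Char) :
    cs.foldl (fun q c => pvStep alfabeto ts q (String.ofList [c])) .inv = .inv := by
  induction cs with
  | nil => rfl
  | cons c cs ih =>
    simp only [List.foldl_cons]
    have : pvStep alfabeto ts .inv (String.ofList [c]) = .inv := by
      unfold pvStep; split <;> rfl
    rw [this, ih]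

-- any invalid symbol sends every extended state to the invalid sink
theorem pvFoldAnyInv (alfabeto : List String) (ts : List (String × String × String))
    (cs : List Char) (q : PvExtSt)
    (h : cs.any (fun c => !(alfabeto.contains (String.ofList [c]))) = true) :
    cs.foldl (fun q c => pvStep alfabeto ts q (String.ofList [c])) q = .inv := by
  induction cs generalizing q with
  | nil => simp at h
  | cons c cs ih =>
    simp only [List.foldl_cons]
    by_cases hc : alfabeto.contains (String.ofList [c]) = true
    · have h' : cs.any (fun c => !(alfabeto.contains (String.ofList [c]))) = true := by
        simp only [List.any_cons, hc] at h; simpa using h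
      exact ih _ h'
    · have : pvStep alfabeto ts q (String.ofList [c]) = .inv := by
        unfold pvStep
        rw [if_pos (by simpa using hc)]
      rw [this, pvFoldInv]

-- on an all-valid word the dead sink is absorbing
theorem pvFoldDead (alfabeto : List String) (ts : List (String × String × String))
    (cs : List Char)
    (h : cs.all (fun c => alfabeto.contains (String.ofList [c])) = true) :
    cs.foldl (fun q c => pvStep alfabeto ts q (String.ofList [c])) .dead = .dead := by
  induction cs with
  | nil => rfl
  | cons c cs ih =>
    simp only [List.all_cons, Bool.and_eq_true] at h
    simp only [List.foldl_cons]
    have : pvStep alfabeto ts .dead (String.ofList [c]) = .dead := by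
      unfold pvStep; rw [if_neg (by simpa using h.1)]
    rw [this, ih h.2]

-- on an all-valid word B's totalized run computes exactly A's break-out run (none ↦ dead)
theorem pvFoldLive (alfabeto : List String) (ts : List (String × String × String))
    (cs : List Char) (st : String)
    (h : cs.all (fun c => alfabeto.contains (String.ofList [c])) = true) :
    cs.foldl (fun q c => pvStep alfabeto ts q (String.ofList [c])) (.live st)
    = (match pvRunA ts st cs with | some t => .live t | none => .dead) := by
  induction cs generalizing st with
  | nil => rfl
  | cons c cs ih =>
    simp only [List.all_cons, Bool.and_eq_true] at h
    simp only [List.foldl_cons, pvRunA]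
    have hstep : pvStep alfabeto ts (.live st) (String.ofList [c])
        = (match pvTrans? ts st (String.ofList [c]) with
           | some t => .live t | none => .dead) := by
      unfold pvStep; rw [if_neg (by simpa using h.1)]
    rw [hstep]
    cases pvTrans? ts st (String.ofList [c]) with
    | some t => exact ih t h.2
    | none => exact pvFoldDead alfabeto ts cs h.2

-- A's per-word branch equals B's per-word totalized run + label
theorem pvBody_eq (alfabeto : List String) (ts : List (String × String × String))
    (q0 : String) (finais : List String) (res : PySem.Dict String String) (palavra : String) :
    (if palavra.toList.any (fun c => !(alfabeto.contains (String.ofList [c]))) then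
        res.insert palavra "INVÁLIDA"
      else
        let fin := pvRunA ts q0 palavra.toList
        let r := if (match fin with | some s => finais.contains s | none => false) then "ACEITA" else "REJEITA"
        res.insert palavra r)
    = res.insert palavra
        (pvLabel finais
          (palavra.toList.foldl (fun q c => pvStep alfabeto ts q (String.ofList [c]))
            (.live q0))) := by
  by_cases hany : palavra.toList.any (fun c => !(alfabeto.contains (String.ofList [c]))) = true
  · rw [if_pos hany, pvFoldAnyInv alfabeto ts _ _ hany]
    rfl
  · have hall : palavra.toList.all (fun c => alfabeto.contains (String.ofList [c])) = true := by
      cases h' : palavra.toList.all (fun c => alfabeto.contains (String.ofList [c])) with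
      | true => rfl
      | false =>
        exfalso
        rcases List.all_eq_false.mp h' with ⟨c, hc, hpc⟩
        exact hany (List.any_eq_true.mpr ⟨c, hc, by simpa using hpc⟩)
    rw [if_neg hany, pvFoldLive alfabeto ts _ _ hall]
    cases hr : pvRunA ts q0 palavra.toList with
    | some t => simp [pvLabel]
    | none => rfl

-- ===== VERDICT (by name: the statement is the Claim_ definition above) =====
theorem process_spec : Claim_equal_process := by
  intro automato palavras _
  unfold Spec_process process process_alt
  have hf : (fun (res : PySem.Dict String String) palavra =>
      if palavra.toList.any (fun c => !(automato.1.contains (String.ofList [c]))) then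
        res.insert palavra "INVÁLIDA"
      else
        let fin := pvRunA automato.2.2.1 automato.2.2.2.1 palavra.toList
        let r := if (match fin with | some s => automato.2.2.2.2.contains s | none => false) then "ACEITA" else "REJEITA"
        res.insert palavra r)
    = (fun (res : PySem.Dict String String) palavra =>
      res.insert palavra
        (pvLabel automato.2.2.2.2
          (palavra.toList.foldl
            (fun q c => pvStep automato.1 automato.2.2.1 q (String.ofList [c]))
            (.live automato.2.2.2.1)))) := by
    funext res palavra
    exact pvBody_eq _ _ _ _ res palavra
  rw [hf]
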